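-- pv_equiv track=rewrite | github.com/markusle56/Advent-of-Code-2025 | day7.py | getCurrentBeam
-- ===== SOURCE A (Python) =====
-- def getCurrentBeam(splitter, beam):
--     new_beam = []
--     count = 0
--     def addSplittedBeam(idx):
--         if idx - 1 not in new_beam:
--             new_beam.append(idx-1)
--         if idx + 1 not in new_beam:
--             new_beam.append(idx + 1)
--     for i in beam:
--         if i in splitter:
--             addSplittedBeam(i)
--             count += 1
--         else:
--             if i not in new_beam:
--                 new_beam.append(i)
--     return new_beam, count
-- ===== SOURCE B (Python) =====
-- def getCurrentBeam(splitter, beam):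
--     expanded = [x for i in beam
--                 for x in ([i - 1, i + 1] if i in splitter else [i])]
--     count = sum(1 for i in beam if i in splitter)
--     return sorted(set(expanded), key=expanded.index), count
-- ===== Notes on version B (the rewrite author's own statement) =====
-- stated objective: alternative
-- what changed: B flattens beam into an expanded candidate list by comprehension and counts splitters with a separate sum, then recovers the order-preserving dedup by sorting the set of distinct candidates by their first index in the expanded list, instead of A's single loop with interleaved membership-checked appends through a closure.
import Mathlib
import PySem

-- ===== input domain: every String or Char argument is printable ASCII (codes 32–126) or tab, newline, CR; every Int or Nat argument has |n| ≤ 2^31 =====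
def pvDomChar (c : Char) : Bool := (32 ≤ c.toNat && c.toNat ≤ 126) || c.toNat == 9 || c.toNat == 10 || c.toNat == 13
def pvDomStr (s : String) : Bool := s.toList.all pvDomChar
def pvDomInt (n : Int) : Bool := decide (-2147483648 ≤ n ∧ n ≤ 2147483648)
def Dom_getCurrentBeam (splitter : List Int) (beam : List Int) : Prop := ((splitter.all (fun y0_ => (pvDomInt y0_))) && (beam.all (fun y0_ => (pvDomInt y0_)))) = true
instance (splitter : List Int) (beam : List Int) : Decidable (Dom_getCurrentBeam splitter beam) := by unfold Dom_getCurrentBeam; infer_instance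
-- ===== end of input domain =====

-- B flattens beam into an expanded candidate list and counts splitters with a separate
-- sum, then recovers the order-preserving dedup by sorting the distinct candidates by
-- their first index in that list; alternative decomposition, same return value.

-- ===== PORT A =====
-- A: one loop, membership-checked appends into new_beam interleaved with counting.
def getCurrentBeam (splitter : List Int) (beam : List Int) : List Int × Int :=
  beam.foldl
    (fun (st : List Int × Int) i =>
      if i ∈ splitter then
        -- addSplittedBeam i
        let nb1 := if i - 1 ∈ st.1 then st.1 else st.1 ++ [i - 1]
        let nb2 := if i + 1 ∈ nb1 then nb1 else nb1 ++ [i + 1]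
        (nb2, st.2 + 1)
      else
        (if i ∈ st.1 then st.1 else st.1 ++ [i], st.2))
    ([], 0)

-- ===== PORT B =====
-- B: comprehension-flattened `expanded`, a separate counting sum, then
-- sorted(set(expanded), key=expanded.index).
def getCurrentBeam_alt (splitter : List Int) (beam : List Int) : List Int × Int :=
  let expanded := beam.flatMap (fun i => if i ∈ splitter then [i - 1, i + 1] else [i])
  let count : Int := ((beam.filter (fun i => decide (i ∈ splitter))).map (fun _ => (1 : Int))).sum
  (PySem.List.sorted (PySem.Set.ofList expanded)
      (fun x => (PySem.List.index? expanded x).getD 0) false,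
   count)

-- ===== PRECONDITION & SPEC =====
def Spec_getCurrentBeam (splitter : List Int) (beam : List Int) (out : List Int × Int) : Prop := out = getCurrentBeam_alt splitter beam
instance (splitter : List Int) (beam : List Int) (out : List Int × Int) : Decidable (Spec_getCurrentBeam splitter beam out) := by unfold Spec_getCurrentBeam; infer_instance

-- ===== CLAIM (what is proved, stated in full; the proofs are below) =====
def Claim_equal_getCurrentBeam : Prop := ∀ (splitter : List Int) (beam : List Int), Dom_getCurrentBeam splitter beam → Spec_getCurrentBeam splitter beam (getCurrentBeam splitter beam)

-- ===== LEMMAS AND PROOFS =====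

-- the expanded sequence and the splitter count, as recursive functions (proof tools only)
def pvExpand (splitter : List Int) : List Int → List Int
  | [] => []
  | i :: rest =>
      (if i ∈ splitter then [i - 1, i + 1] else [i]) ++ pvExpand splitter rest

def pvCnt (splitter : List Int) : List Int → Int
  | [] => 0
  | i :: rest => (if i ∈ splitter then 1 else 0) + pvCnt splitter rest

lemma afold_eq (splitter : List Int) : ∀ (beam : List Int) (nb : List Int) (c : Int),
    beam.foldl
      (fun (st : List Int × Int) i =>
        if i ∈ splitter then
          let nb1 := if i - 1 ∈ st.1 then st.1 else st.1 ++ [i - 1]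
          let nb2 := if i + 1 ∈ nb1 then nb1 else nb1 ++ [i + 1]
          (nb2, st.2 + 1)
        else
          (if i ∈ st.1 then st.1 else st.1 ++ [i], st.2)) (nb, c)
    = (List.foldl PySem.Set.add nb (pvExpand splitter beam), c + pvCnt splitter beam) := by
  intro beam
  induction beam with
  | nil => intro nb c; simp [pvExpand, pvCnt]
  | cons i rest ih =>
      intro nb c
      by_cases h : i ∈ splitter
      · simp only [List.foldl_cons, h, if_pos, pvExpand, pvCnt, List.foldl_append, ih,
          List.foldl_cons, List.foldl_nil, Prod.mk.injEq]
        constructor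
        · simp [PySem.Set.add, List.contains_eq_mem]
        · ring
      · simp only [List.foldl_cons, h, if_neg, pvExpand, pvCnt,
          List.foldl_append, ih, not_false_iff, List.foldl_nil, Prod.mk.injEq]
        constructor
        · simp [PySem.Set.add, List.contains_eq_mem]
        · ring

lemma flatMap_eq_pvExpand (splitter : List Int) : ∀ (beam : List Int),
    beam.flatMap (fun i => if i ∈ splitter then [i - 1, i + 1] else [i])
      = pvExpand splitter beam := by
  intro beam
  induction beam with
  | nil => rfl
  | cons i rest ih => simp [pvExpand, ih]

lemma filterlen_eq_pvCnt (splitter : List Int) : ∀ (beam : List Int),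
    (((beam.filter (fun i => decide (i ∈ splitter))).length : Int)) = pvCnt splitter beam := by
  intro beam
  induction beam with
  | nil => rfl
  | cons i rest ih =>
      by_cases h : i ∈ splitter
      · simp [pvCnt, h, ← ih]; omega
      · simp [pvCnt, h, ← ih]

lemma sum_eq_pvCnt (splitter : List Int) (beam : List Int) :
    ((beam.filter (fun i => decide (i ∈ splitter))).map (fun _ => (1 : Int))).sum
      = pvCnt splitter beam := by
  have := filterlen_eq_pvCnt splitter beam
  simpa using this

-- first index of a member is defined and bounded by the length
lemma index?_getD_lt_length (l : List Int) (x : Int) (h : x ∈ l) :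
    (PySem.List.index? l x).getD 0 < l.length := by
  have hs : (PySem.List.index? l x).isSome := (PySem.List.index?_isSome_iff l x).mpr h
  rcases Option.isSome_iff_exists.mp hs with ⟨k, hk⟩
  rcases (PySem.List.index?_eq_some_iff l x k).mp hk with ⟨pre, suf, hsplit, hlen, -⟩
  rw [hk]
  simp [hsplit, ← hlen]

-- dedup lists first occurrences in order: strictly increasing first index
lemma dedup_pairwise_key (xs : List Int) :
    (PySem.List.dedup xs).Pairwise
      (fun a b => (PySem.List.index? xs a).getD 0 < (PySem.List.index? xs b).getD 0) := by
  induction xs using List.reverseRecOn with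
  | nil => simp [PySem.List.dedup_eq_ofList, PySem.Set.ofList_eq_foldl]
  | append_singleton xs y ih =>
      have hstep : PySem.List.dedup (xs ++ [y])
          = if y ∈ PySem.List.dedup xs then PySem.List.dedup xs
            else PySem.List.dedup xs ++ [y] := by
        simp [PySem.List.dedup_eq_ofList, PySem.Set.ofList_eq_foldl, PySem.Set.add,
          List.contains_eq_mem]
      have hmemxs : ∀ a ∈ PySem.List.dedup xs, a ∈ xs := by
        intro a ha; exact (PySem.List.mem_dedup xs a).mp ha
      have hidx : ∀ a ∈ PySem.List.dedup xs,
          PySem.List.index? (xs ++ [y]) a = PySem.List.index? xs a := by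
        intro a ha
        exact PySem.List.index?_append_of_mem [y] (hmemxs a ha)
      by_cases hy : y ∈ PySem.List.dedup xs
      · rw [hstep, if_pos hy]
        refine ih.imp_of_mem ?_
        intro a b ha hb hlt
        rw [hidx a ha, hidx b hb]
        exact hlt
      · rw [hstep, if_neg hy]
        have hynxs : y ∉ xs := fun h => hy ((PySem.List.mem_dedup xs y).mpr h)
        rw [List.pairwise_append]
        refine ⟨ih.imp_of_mem ?_, by simp, ?_⟩
        · intro a b ha hb hlt
          rw [hidx a ha, hidx b hb]
          exact hlt
        · intro a ha b hb
          simp only [List.mem_singleton] at hb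
          subst hb
          have h2 : PySem.List.index? (xs ++ [b]) b = some xs.length :=
            PySem.List.index?_append_singleton_self _ _ hynxs
          rw [hidx a ha, h2]
          have := index?_getD_lt_length xs a (hmemxs a ha)
          simpa using this

lemma sorted_by_index_eq_dedup (E : List Int) :
    PySem.List.sorted (PySem.Set.ofList E)
        (fun x => (PySem.List.index? E x).getD 0) false
      = PySem.List.dedup E := by
  apply PySem.List.sorted_eq_of_perm_of_pairwise_lt
  · rw [PySem.List.dedup_eq_ofList]
  · exact dedup_pairwise_key E

-- ===== VERDICT (by name: the statement is the Claim_ definition above) =====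
theorem getCurrentBeam_spec : Claim_equal_getCurrentBeam := by
  intro splitter beam _
  unfold Spec_getCurrentBeam getCurrentBeam getCurrentBeam_alt
  rw [afold_eq]
  simp only [flatMap_eq_pvExpand, sum_eq_pvCnt]
  rw [sorted_by_index_eq_dedup]
  simp [PySem.List.dedup_eq_ofList, PySem.Set.ofList_eq_foldl]
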